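-- pv_equiv track=rewrite | github.com/larsks/airdancer-slack | airdancer/utils/table_formatters.py | _create_box_table
-- ===== SOURCE A (Python) =====
-- def _create_box_table(headers: list[str], rows_data: list[list[str]]) -> str:
--     """Generic function to create box tables using Unicode box drawing characters"""
--     if not rows_data:
--         return ""
--
--     # Calculate column widths based on content
--     col_widths = []
--     for i, header in enumerate(headers):
--         max_width = max(len(header), max(len(row[i]) for row in rows_data))
--         col_widths.append(max_width)
--
--     # Box drawing characters
--     top_left = "┌"
--     top_right = "┐"
--     bottom_left = "└"
--     bottom_right = "┘"
--     horizontal = "─"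
--     vertical = "│"
--     cross = "┼"
--     top_tee = "┬"
--     bottom_tee = "┴"
--     left_tee = "├"
--     right_tee = "┤"
--
--     # Build the table
--     lines = []
--
--     # Top border
--     top_line = top_left
--     for i, width in enumerate(col_widths):
--         top_line += horizontal * (width + 2)  # +2 for padding
--         if i < len(col_widths) - 1:
--             top_line += top_tee
--     top_line += top_right
--     lines.append(top_line)
--
--     # Header row
--     header_line = vertical
--     for i, (header, width) in enumerate(zip(headers, col_widths)):
--         header_line += f" {header:<{width}} "
--         if i < len(col_widths) - 1:
--             header_line += vertical
--     header_line += vertical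
--     lines.append(header_line)
--
--     # Header separator
--     sep_line = left_tee
--     for i, width in enumerate(col_widths):
--         sep_line += horizontal * (width + 2)
--         if i < len(col_widths) - 1:
--             sep_line += cross
--     sep_line += right_tee
--     lines.append(sep_line)
--
--     # Data rows
--     for row in rows_data:
--         data_line = vertical
--         for i, (value, width) in enumerate(zip(row, col_widths)):
--             data_line += f" {value:<{width}} "
--             if i < len(col_widths) - 1:
--                 data_line += vertical
--         data_line += vertical
--         lines.append(data_line)
--
--     # Bottom border
--     bottom_line = bottom_left
--     for i, width in enumerate(col_widths):
--         bottom_line += horizontal * (width + 2)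
--         if i < len(col_widths) - 1:
--             bottom_line += bottom_tee
--     bottom_line += bottom_right
--     lines.append(bottom_line)
--
--     return "```\n" + "\n".join(lines) + "\n```"
-- ===== SOURCE B (Python) =====
-- def _create_box_table(headers: list[str], rows_data: list[list[str]]) -> str:
--     """Column-major construction: build each column's vertical strip top-to-bottom,
--     then transpose the strips into lines with zip (A builds line-by-line, row-major)."""
--     if not rows_data:
--         return ""
--
--     def column(top, hdr, sep, cell_of, bot):
--         return [top, hdr, sep] + [cell_of(r) for r in rows_data] + [bot]
--
--     def edge(t, m, b):
--         return column(t, "│", m, lambda r: "│", b)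
--
--     strips = []
--     for i, h in enumerate(headers):
--         w = max(len(h), max(len(r[i]) for r in rows_data))
--         strips.append(column("─" * (w + 2), f" {h:<{w}} ", "─" * (w + 2),
--                              lambda r, i=i, w=w: f" {r[i]:<{w}} ", "─" * (w + 2)))
--
--     mid = edge("┬", "┼", "┴")
--     columns = ([edge("┌", "├", "└")] + strips[:1]
--                + [c for s in strips[1:] for c in (mid, s)]
--                + [edge("┐", "┤", "┘")])
--
--     lines = ["".join(parts) for parts in zip(*columns)]
--     return "```\n" + "\n".join(lines) + "\n```"
-- ===== Notes on version B (the rewrite author's own statement) =====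
-- stated objective: alternative
-- what changed: B assembles the table column-major: it builds a vertical strip (border pieces, header cell, data cells) per column plus edge/separator strips, then transposes the strips into lines with zip, instead of A's row-major loop that concatenates each line left to right with an index test for the inner tee.
import Mathlib
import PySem

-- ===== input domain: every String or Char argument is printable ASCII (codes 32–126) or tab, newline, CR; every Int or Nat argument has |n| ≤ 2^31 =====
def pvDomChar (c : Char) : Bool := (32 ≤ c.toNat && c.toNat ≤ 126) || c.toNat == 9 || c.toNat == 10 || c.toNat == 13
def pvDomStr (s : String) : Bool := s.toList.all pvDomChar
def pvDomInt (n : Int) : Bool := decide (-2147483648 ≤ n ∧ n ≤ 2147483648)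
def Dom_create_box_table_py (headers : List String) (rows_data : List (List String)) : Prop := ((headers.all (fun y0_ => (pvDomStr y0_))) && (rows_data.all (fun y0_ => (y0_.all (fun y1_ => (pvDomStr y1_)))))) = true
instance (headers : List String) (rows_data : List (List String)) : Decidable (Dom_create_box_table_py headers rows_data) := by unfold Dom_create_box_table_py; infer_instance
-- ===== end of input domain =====

-- B builds the table column-major (one vertical strip per column, then a zip-transpose
-- into lines) instead of A's row-major line-by-line concatenation (objective: alternative).

-- Shared primitive: Python's f" {v:<{w}} " cell (ljust pads with max(0, w - len)).
def pvCell (v : List Char) (w : Nat) : List Char :=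
  ' ' :: (v ++ List.replicate (w - v.length) ' ') ++ [' ']

-- Python's max(len(row[i]) for row in rows_data) (rows_data nonempty inside Pre_;
-- outside Pre_ Python raises IndexError, the port reads "" there).
def pvRowMax (rows_data : List (List String)) (i : Int) : Nat :=
  (rows_data.map (fun row => (PySem.List.pyGetD row i "").toList.length)).foldl max 0

-- ===== PORT A =====
-- A's col_widths loop: for i, header in enumerate(headers): append max(len(header), max(...))
def pvAWidths (rows_data : List (List String)) : Int → List String → List Nat
  | _, [] => []
  | i, h :: hs => max h.toList.length (pvRowMax rows_data i) :: pvAWidths rows_data (i + 1) hs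

-- A's border loop body: horizontal*(w+2), then the tee iff i < len(col_widths)-1
def pvABorderGo (tee : Char) (n : Nat) : Nat → List Nat → List Char
  | _, [] => []
  | i, w :: ws =>
      List.replicate (w + 2) '─' ++ (if i < n - 1 then [tee] else []) ++ pvABorderGo tee n (i + 1) ws

def pvABorder (l : Char) (tee : Char) (r : Char) (ws : List Nat) : List Char :=
  l :: pvABorderGo tee ws.length 0 ws ++ [r]

-- A's row loop body over zip(values, col_widths): cell, then '│' iff i < len(col_widths)-1
def pvARowGo (n : Nat) : Nat → List (String × Nat) → List Char
  | _, [] => []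
  | i, (v, w) :: ps =>
      pvCell v.toList w ++ (if i < n - 1 then ['│'] else []) ++ pvARowGo n (i + 1) ps

def pvARow (n : Nat) (ps : List (String × Nat)) : List Char :=
  '│' :: pvARowGo n 0 ps ++ ['│']

def create_box_table_py (headers : List String) (rows_data : List (List String)) : String :=
  if rows_data = [] then "" else
    let col_widths := pvAWidths rows_data 0 headers
    let n := col_widths.length
    let lines : List (List Char) :=
      pvABorder '┌' '┬' '┐' col_widths
        :: pvARow n (headers.zip col_widths)
        :: pvABorder '├' '┼' '┤' col_widths
        :: rows_data.map (fun row => pvARow n (row.zip col_widths))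
        ++ [pvABorder '└' '┴' '┘' col_widths]
    String.ofList ("```\n".toList ++ PySem.Chars.join ['\n'] lines ++ "\n```".toList)

-- ===== PORT B =====
-- B's column(top, hdr, sep, cell_of, bot): [top, hdr, sep] + [cell_of(r) for r in rows_data] + [bot]
def pvColumn (rows_data : List (List String)) (top hdr sep : List Char)
    (cellOf : List String → List Char) (bot : List Char) : List (List Char) :=
  top :: hdr :: sep :: rows_data.map cellOf ++ [bot]

-- B's edge(t, m, b)
def pvEdgeCol (rows_data : List (List String)) (t m b : Char) : List (List Char) :=
  pvColumn rows_data [t] ['│'] [m] (fun _ => ['│']) [b]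

-- B's per-column strip (r[i] is in range inside Pre_; the port reads "" out of range,
-- where Python raises IndexError — excluded by Pre_).
def pvStrip (rows_data : List (List String)) (p : Int × String) : List (List Char) :=
  let w := max p.2.toList.length (pvRowMax rows_data p.1)
  pvColumn rows_data (List.replicate (w + 2) '─') (pvCell p.2.toList w) (List.replicate (w + 2) '─')
    (fun r => pvCell (PySem.List.pyGetD r p.1 "").toList w) (List.replicate (w + 2) '─')

-- B's ["".join(parts) for parts in zip(*columns)]: advance all columns in lockstep,
-- stopping when any column is exhausted (Python zip semantics).
def pvHT : List (List (List Char)) → Option (List (List Char) × List (List (List Char)))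
  | [] => some ([], [])
  | [] :: _ => none
  | (x :: t) :: rest =>
    match pvHT rest with
    | none => none
    | some (hs, ts) => some (x :: hs, t :: ts)

def pvZipJoin : List (List (List Char)) → List (List Char)
  | [] => []
  | [] :: _ => []
  | (x :: c') :: cs =>
    match pvHT cs with
    | none => []
    | some (hs, ts) => (x ++ hs.flatten) :: pvZipJoin (c' :: ts)
termination_by cols => (cols.headD []).length
decreasing_by simp

def create_box_table_py_alt (headers : List String) (rows_data : List (List String)) : String :=
  if rows_data = [] then "" else
    let strips := (PySem.List.enumerate headers 0).map (pvStrip rows_data)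
    let mid := pvEdgeCol rows_data '┬' '┼' '┴'
    let columns := pvEdgeCol rows_data '┌' '├' '└'
      :: (strips.take 1 ++ (strips.drop 1).flatMap (fun s => [mid, s])
          ++ [pvEdgeCol rows_data '┐' '┤' '┘'])
    let lines := pvZipJoin columns
    String.ofList ("```\n".toList ++ PySem.Chars.join ['\n'] lines ++ "\n```".toList)

-- ===== PRECONDITION & SPEC =====
-- Pre_ excludes only inputs where both Pythons raise IndexError: some row shorter than headers
-- (row[i] in the width computation), with rows_data nonempty.
def Pre_create_box_table_py (headers : List String) (rows_data : List (List String)) : Prop :=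
  rows_data = [] ∨ ∀ row ∈ rows_data, headers.length ≤ row.length
instance (headers : List String) (rows_data : List (List String)) : Decidable (Pre_create_box_table_py headers rows_data) := by unfold Pre_create_box_table_py; infer_instance

def pvWitness_create_box_table_py : List String × List (List String) := (["h", "id"], [["x", "y"], ["aa", "b"]])

def Spec_create_box_table_py (headers : List String) (rows_data : List (List String)) (out : String) : Prop := out = create_box_table_py_alt headers rows_data
instance (headers : List String) (rows_data : List (List String)) (out : String) : Decidable (Spec_create_box_table_py headers rows_data out) := by unfold Spec_create_box_table_py; infer_instance

-- ===== CLAIM (what is proved, stated in full; the proofs are below) =====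
def Claim_equal_create_box_table_py : Prop := ∀ (headers : List String) (rows_data : List (List String)), Dom_create_box_table_py headers rows_data → Pre_create_box_table_py headers rows_data → Spec_create_box_table_py headers rows_data (create_box_table_py headers rows_data)

-- ===== LEMMAS AND PROOFS =====

-- A column description: the five pieces B's column() receives; pvColOf rebuilds the strip.
structure PvDesc where
  top : List Char
  hdr : List Char
  sep : List Char
  cell : List String → List Char
  bot : List Char

def pvColOf (rows : List (List String)) (d : PvDesc) : List (List Char) :=
  d.top :: d.hdr :: d.sep :: rows.map d.cell ++ [d.bot]

def pvEdgeDesc (t m b : Char) : PvDesc := ⟨[t], ['│'], [m], fun _ => ['│'], [b]⟩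

def pvStripDesc (rows_data : List (List String)) (p : Int × String) : PvDesc :=
  let w := max p.2.toList.length (pvRowMax rows_data p.1)
  ⟨List.replicate (w + 2) '─', pvCell p.2.toList w, List.replicate (w + 2) '─',
   fun r => pvCell (PySem.List.pyGetD r p.1 "").toList w, List.replicate (w + 2) '─'⟩

theorem pvHT_map (l : List PvDesc) (f : PvDesc → List Char) (g : PvDesc → List (List Char)) :
    pvHT (l.map (fun d => f d :: g d)) = some (l.map f, l.map g) := by
  induction l with
  | nil => rfl
  | cons d l ih => simp [pvHT, ih]

theorem pvZipJoin_peel (d0 : PvDesc) (l : List PvDesc)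
    (f : PvDesc → List Char) (g : PvDesc → List (List Char)) :
    pvZipJoin ((d0 :: l).map (fun d => f d :: g d))
      = ((d0 :: l).map f).flatten :: pvZipJoin ((d0 :: l).map g) := by
  simp only [List.map_cons]
  rw [pvZipJoin]
  rw [pvHT_map]
  simp

theorem pvZipJoin_nilcols (d0 : PvDesc) (l : List PvDesc) :
    pvZipJoin ((d0 :: l).map (fun _ => ([] : List (List Char)))) = [] := by
  simp only [List.map_cons]
  rw [pvZipJoin]

theorem pvZipJoin_rows (rows : List (List String)) (d0 : PvDesc) (l : List PvDesc) :
    pvZipJoin ((d0 :: l).map (fun d => rows.map d.cell ++ [d.bot]))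
      = rows.map (fun r => ((d0 :: l).map (fun d => d.cell r)).flatten)
        ++ [((d0 :: l).map (fun d => d.bot)).flatten] := by
  induction rows with
  | nil =>
    have h := pvZipJoin_peel d0 l (fun d => d.bot) (fun _ => [])
    have h2 := pvZipJoin_nilcols d0 l
    simp only [List.map_nil, List.nil_append]
    rw [h, h2]
  | cons r rows ih =>
    have h := pvZipJoin_peel d0 l (fun d => d.cell r)
      (fun d => rows.map d.cell ++ [d.bot])
    simp only [List.map_cons, List.cons_append] at h ih ⊢
    rw [h, ih]

-- The zip-transpose of uniformly shaped columns, line by line.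
theorem pvZipJoin_cols (rows : List (List String)) (d0 : PvDesc) (l : List PvDesc) :
    pvZipJoin ((d0 :: l).map (pvColOf rows))
      = ((d0 :: l).map (fun d => d.top)).flatten
        :: ((d0 :: l).map (fun d => d.hdr)).flatten
        :: ((d0 :: l).map (fun d => d.sep)).flatten
        :: rows.map (fun r => ((d0 :: l).map (fun d => d.cell r)).flatten)
        ++ [((d0 :: l).map (fun d => d.bot)).flatten] := by
  have h1 := pvZipJoin_peel d0 l (fun d => d.top)
    (fun d => d.hdr :: d.sep :: rows.map d.cell ++ [d.bot])
  have h2 := pvZipJoin_peel d0 l (fun d => d.hdr)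
    (fun d => d.sep :: rows.map d.cell ++ [d.bot])
  have h3 := pvZipJoin_peel d0 l (fun d => d.sep)
    (fun d => rows.map d.cell ++ [d.bot])
  have h4 := pvZipJoin_rows rows d0 l
  show pvZipJoin ((d0 :: l).map (fun d => d.top :: d.hdr :: d.sep :: rows.map d.cell ++ [d.bot])) = _
  simp only [List.cons_append] at h1 h2 h3 h4 ⊢
  rw [h1, h2, h3, h4]

-- sep.join(ys) written as flatten (ys[:1] ++ [x for s in ys[1:] for x in (sep, s)]).
theorem pvJoin_aux (m : List Char) (y : List Char) (ys : List (List Char)) :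
    PySem.Chars.join m (y :: ys) = y ++ ys.flatMap (fun s => m ++ s) := by
  induction ys generalizing y with
  | nil => simp [PySem.Chars.join_singleton]
  | cons y2 ys ih => simp [PySem.Chars.join_cons_cons, ih]

theorem pvFlatAux (m : List Char) (ys : List (List Char)) :
    (ys.flatMap (fun s => [m, s])).flatten = ys.flatMap (fun s => m ++ s) := by
  induction ys with
  | nil => rfl
  | cons y ys ih => simp [ih]

theorem pvFlattenInter (m : List Char) (ys : List (List Char)) :
    (ys.take 1 ++ (ys.drop 1).flatMap (fun s => [m, s])).flatten = PySem.Chars.join m ys := by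
  cases ys with
  | nil => simp [PySem.Chars.join_nil]
  | cons y ys => simp [pvJoin_aux, pvFlatAux]

-- A's width loop as a map over enumerate.
theorem pvWidths_eq (rows_data : List (List String)) (hs : List String) (i : Int) :
    pvAWidths rows_data i hs
      = (PySem.List.enumerate hs i).map (fun p => max p.2.toList.length (pvRowMax rows_data p.1)) := by
  induction hs generalizing i with
  | nil => simp [pvAWidths, PySem.List.enumerate_nil]
  | cons h t ih => simp [pvAWidths, PySem.List.enumerate_cons, ih]

theorem pvAWidths_length (rows_data : List (List String)) (hs : List String) (i : Int) :
    (pvAWidths rows_data i hs).length = hs.length := by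
  induction hs generalizing i with
  | nil => rfl
  | cons h t ih => simp [pvAWidths, ih]

-- A's index-counting border loop equals a join.
theorem pvABorderGo_eq (tee : Char) (n : Nat) (i : Nat) (ws : List Nat) (h : i + ws.length = n) :
    pvABorderGo tee n i ws
      = PySem.Chars.join [tee] (ws.map (fun w => List.replicate (w + 2) '─')) := by
  induction ws generalizing i with
  | nil => simp [pvABorderGo, PySem.Chars.join_nil]
  | cons w ws ih =>
    cases ws with
    | nil =>
      simp only [pvABorderGo, List.length_cons, List.length_nil] at *
      have : ¬ i < n - 1 := by omega
      simp [this, PySem.Chars.join_singleton]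
    | cons w2 ws2 =>
      have hlt : i < n - 1 := by simp at h; omega
      have hrec := ih (i + 1) (by simp at h ⊢; omega)
      have hstep : pvABorderGo tee n i (w :: w2 :: ws2)
          = List.replicate (w + 2) '─' ++ ([tee] ++ pvABorderGo tee n (i + 1) (w2 :: ws2)) := by
        rw [pvABorderGo, if_pos hlt]; simp
      rw [hstep, hrec]; simp [PySem.Chars.join_cons_cons]

theorem pvABorder_eq (l tee r : Char) (ws : List Nat) :
    pvABorder l tee r ws
      = l :: PySem.Chars.join [tee] (ws.map (fun w => List.replicate (w + 2) '─')) ++ [r] := by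
  unfold pvABorder
  rw [pvABorderGo_eq tee ws.length 0 ws (by omega)]

-- A's index-counting row loop equals a join, when the zipped list has the full n cells.
theorem pvARowGo_eq (n : Nat) (i : Nat) (ps : List (String × Nat)) (h : i + ps.length = n) :
    pvARowGo n i ps
      = PySem.Chars.join ['│'] (ps.map (fun p => pvCell p.1.toList p.2)) := by
  induction ps generalizing i with
  | nil => simp [pvARowGo, PySem.Chars.join_nil]
  | cons p ps ih =>
    obtain ⟨v, w⟩ := p
    cases ps with
    | nil =>
      simp only [pvARowGo, List.length_cons, List.length_nil] at *
      have : ¬ i < n - 1 := by omega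
      simp [this, PySem.Chars.join_singleton]
    | cons p2 ps2 =>
      have hlt : i < n - 1 := by simp at h; omega
      have hrec := ih (i + 1) (by simp at h ⊢; omega)
      have hstep : pvARowGo n i ((v, w) :: p2 :: ps2)
          = pvCell v.toList w ++ (['│'] ++ pvARowGo n (i + 1) (p2 :: ps2)) := by
        rw [pvARowGo, if_pos hlt]; simp
      rw [hstep, hrec]; simp [PySem.Chars.join_cons_cons]

theorem pvARow_eq (ws : List Nat) (vs : List String) (h : ws.length ≤ vs.length) :
    pvARow ws.length (vs.zip ws)
      = '│' :: PySem.Chars.join ['│'] ((vs.zip ws).map (fun p => pvCell p.1.toList p.2)) ++ ['│'] := by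
  unfold pvARow
  rw [pvARowGo_eq ws.length 0 (vs.zip ws) (by simp [Nat.min_eq_right h])]

-- zip(headers, widths) cells as a map over enumerate.
theorem pvHdrCells (rows : List (List String)) (hs : List String) (i : Int) :
    (hs.zip (pvAWidths rows i hs)).map (fun p => pvCell p.1.toList p.2)
      = (PySem.List.enumerate hs i).map
          (fun p => pvCell p.2.toList (max p.2.toList.length (pvRowMax rows p.1))) := by
  induction hs generalizing i with
  | nil => simp [pvAWidths, PySem.List.enumerate_nil]
  | cons h t ih => simp [pvAWidths, PySem.List.enumerate_cons, ih]

-- zip(row, widths) cells as a map over enumerate, for a row at least as long as headers.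
theorem pvRowCells (rows : List (List String)) (hs : List String) (i : Nat) (r : List String)
    (h : i + hs.length ≤ r.length) :
    ((r.drop i).zip (pvAWidths rows i hs)).map (fun p => pvCell p.1.toList p.2)
      = (PySem.List.enumerate hs (i : Int)).map
          (fun p => pvCell (PySem.List.pyGetD r p.1 "").toList
            (max p.2.toList.length (pvRowMax rows p.1))) := by
  induction hs generalizing i with
  | nil => simp [pvAWidths, PySem.List.enumerate_nil]
  | cons hh t ih =>
    have hi : i < r.length := by simp at h; omega
    have hdrop : r.drop i = r[i] :: r.drop (i + 1) := List.drop_eq_getElem_cons hi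
    have hget : PySem.List.pyGetD r (i : Int) "" = r[i] := by
      rw [PySem.List.pyGetD_natCast]
      exact List.getD_eq_getElem r "" hi
    have hrec := ih (i + 1) (by simp at h ⊢; omega)
    simp only [pvAWidths, PySem.List.enumerate_cons, hdrop, List.zip_cons_cons, List.map_cons]
    have hcast : ((i : Int) + 1) = ((i + 1 : Nat) : Int) := by push_cast; ring
    rw [hget, hcast, ← hrec]

-- ===== VERDICT (by name: the statement is the Claim_ definition above) =====
theorem create_box_table_py_spec : Claim_equal_create_box_table_py := by
  intro headers rows_data _hdom hpre
  unfold Spec_create_box_table_py create_box_table_py create_box_table_py_alt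
  by_cases hr : rows_data = []
  · simp [hr]
  · simp only [hr, if_false]
    rcases hpre with hpre | hpre
    · exact absurd hpre hr
    -- B's columns are exactly the descriptions' columns (definitional)
    have hcols :
        (pvEdgeCol rows_data '┌' '├' '└'
          :: (((PySem.List.enumerate headers 0).map (pvStrip rows_data)).take 1
              ++ (((PySem.List.enumerate headers 0).map (pvStrip rows_data)).drop 1).flatMap
                  (fun s => [pvEdgeCol rows_data '┬' '┼' '┴', s])
              ++ [pvEdgeCol rows_data '┐' '┤' '┘']))
        = (pvEdgeDesc '┌' '├' '└'
            :: (((PySem.List.enumerate headers 0).map (pvStripDesc rows_data)).take 1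
                ++ (((PySem.List.enumerate headers 0).map (pvStripDesc rows_data)).drop 1).flatMap
                    (fun d => [pvEdgeDesc '┬' '┼' '┴', d])
                ++ [pvEdgeDesc '┐' '┤' '┘'])).map (pvColOf rows_data) := by
      have hfun' : ∀ p, pvColOf rows_data (pvStripDesc rows_data p) = pvStrip rows_data p :=
        fun _ => rfl
      have hedge' : ∀ t m b, pvColOf rows_data (pvEdgeDesc t m b) = pvEdgeCol rows_data t m b :=
        fun _ _ _ => rfl
      simp only [List.map_cons, List.map_append, ← List.map_take, ← List.map_drop,
        List.map_flatMap, List.flatMap_map, List.map_map, List.map_nil, Function.comp_def,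
        hfun', hedge']
    rw [hcols, pvZipJoin_cols]
    set D := (PySem.List.enumerate headers 0).map (pvStripDesc rows_data) with hD
    have hline : ∀ f : PvDesc → List Char,
        ((pvEdgeDesc '┌' '├' '└' :: (D.take 1 ++ (D.drop 1).flatMap
            (fun d => [pvEdgeDesc '┬' '┼' '┴', d]) ++ [pvEdgeDesc '┐' '┤' '┘'])).map f).flatten
          = f (pvEdgeDesc '┌' '├' '└')
            ++ PySem.Chars.join (f (pvEdgeDesc '┬' '┼' '┴')) (D.map f)
            ++ f (pvEdgeDesc '┐' '┤' '┘') := by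
      intro f
      rw [← pvFlattenInter (f (pvEdgeDesc '┬' '┼' '┴')) (D.map f)]
      simp [← List.map_take, ← List.map_drop, List.flatMap_def,
        Function.comp_def]
    have hws := pvWidths_eq rows_data headers 0
    have hlen := pvAWidths_length rows_data headers 0
    set ws := pvAWidths rows_data 0 headers with hwsdef
    have htop : ws.map (fun w => List.replicate (w + 2) '─')
        = D.map (fun d => d.top) := by
      rw [hws, hD, List.map_map, List.map_map]; rfl
    have hhdr : (headers.zip ws).map (fun p => pvCell p.1.toList p.2)
        = D.map (fun d => d.hdr) := by
      rw [hwsdef, pvHdrCells, hD, List.map_map]; rfl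
    have hrow : ∀ r ∈ rows_data, (r.zip ws).map (fun p => pvCell p.1.toList p.2)
        = D.map (fun d => d.cell r) := by
      intro r hrmem
      have h0 := pvRowCells rows_data headers 0 r (by simpa using hpre r hrmem)
      simp only [List.drop_zero, Int.natCast_zero] at h0
      rw [hwsdef, h0, hD, List.map_map]; rfl
    -- sep and bot pieces of a strip are the same dashes as its top
    have hsepmap : D.map (fun d => d.sep) = D.map (fun d => d.top) := by
      rw [hD, List.map_map, List.map_map]; rfl
    have hbotmap : D.map (fun d => d.bot) = D.map (fun d => d.top) := by
      rw [hD, List.map_map, List.map_map]; rfl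
    -- each of A's lines equals the corresponding transposed line of B
    have htopline :
        pvABorder '┌' '┬' '┐' ws
          = ((pvEdgeDesc '┌' '├' '└' :: (D.take 1 ++ (D.drop 1).flatMap
              (fun d => [pvEdgeDesc '┬' '┼' '┴', d]) ++ [pvEdgeDesc '┐' '┤' '┘'])).map
                (fun d => d.top)).flatten := by
      rw [hline (fun d => d.top), pvABorder_eq, htop]; rfl
    have hhdrline :
        pvARow ws.length (headers.zip ws)
          = ((pvEdgeDesc '┌' '├' '└' :: (D.take 1 ++ (D.drop 1).flatMap
              (fun d => [pvEdgeDesc '┬' '┼' '┴', d]) ++ [pvEdgeDesc '┐' '┤' '┘'])).map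
                (fun d => d.hdr)).flatten := by
      rw [hline (fun d => d.hdr), pvARow_eq ws headers (le_of_eq hlen), hhdr]; rfl
    have hsepline :
        pvABorder '├' '┼' '┤' ws
          = ((pvEdgeDesc '┌' '├' '└' :: (D.take 1 ++ (D.drop 1).flatMap
              (fun d => [pvEdgeDesc '┬' '┼' '┴', d]) ++ [pvEdgeDesc '┐' '┤' '┘'])).map
                (fun d => d.sep)).flatten := by
      rw [hline (fun d => d.sep), pvABorder_eq, htop, hsepmap]; rfl
    have hbotline :
        pvABorder '└' '┴' '┘' ws
          = ((pvEdgeDesc '┌' '├' '└' :: (D.take 1 ++ (D.drop 1).flatMap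
              (fun d => [pvEdgeDesc '┬' '┼' '┴', d]) ++ [pvEdgeDesc '┐' '┤' '┘'])).map
                (fun d => d.bot)).flatten := by
      rw [hline (fun d => d.bot), pvABorder_eq, htop, hbotmap]; rfl
    have hrowsline :
        rows_data.map (fun row => pvARow ws.length (row.zip ws))
          = rows_data.map (fun r => ((pvEdgeDesc '┌' '├' '└' :: (D.take 1 ++ (D.drop 1).flatMap
              (fun d => [pvEdgeDesc '┬' '┼' '┴', d]) ++ [pvEdgeDesc '┐' '┤' '┘'])).map
                (fun d => d.cell r)).flatten) := by
      apply List.map_congr_left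
      intro r hrmem
      rw [hline (fun d => d.cell r), pvARow_eq ws r (by rw [hlen]; exact hpre r hrmem),
          hrow r hrmem]
      rfl
    rw [htopline, hhdrline, hsepline, hbotline, hrowsline]
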